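-- pv_equiv track=rewrite | github.com/GabrielGodefroy/StochasticInterpData | Table3/bell_number.py | compute_bell_triangle
-- ===== SOURCE A (Python) =====
-- def compute_bell_triangle(up_to):
-- 	bell_triangle = [[1]];
-- 	for i in range(1, up_to):
-- 		bell_triangle.append([None for a in range(i+1)])
-- 		for j in range(0,i+1):
-- 			if(j==0):
-- 				bell_triangle[i][j] = bell_triangle[i-1][i-1]
-- 			else:
-- 				bell_triangle[i][j] = bell_triangle[i-1][j-1] +\
-- 										bell_triangle[i][j-1]
-- 	return bell_triangle
-- ===== SOURCE B (Python) =====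
-- def compute_bell_triangle(up_to):
--     n = up_to if up_to > 1 else 1
--     # Pascal's triangle rows: pascal[m][k] = C(m, k)
--     pascal = [[1]]
--     for _ in range(1, n):
--         p = pascal[-1]
--         pascal.append([x + y for x, y in zip([0] + p, p + [0])])
--     # Bell numbers via Touchard's recurrence: B(m+1) = sum_k C(m,k) B(k)
--     bell = [1]
--     for m in range(n - 1):
--         bell.append(sum(pascal[m][k] * bell[k] for k in range(m + 1)))
--     # closed form for triangle entries: T(i,j) = sum_m C(j,m) * B(i-j+m)
--     return [[sum(pascal[j][m] * bell[i - j + m] for m in range(j + 1))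
--              for j in range(i + 1)]
--             for i in range(n)]
-- ===== Notes on version B (the rewrite author's own statement) =====
-- stated objective: alternative
-- what changed: B abandons A's in-place triangle recurrence entirely: it computes Pascal's triangle, then the Bell numbers by Touchard's recurrence B(m+1)=sum_k C(m,k)B(k), and finally each triangle entry directly by the closed form T(i,j)=sum_m C(j,m)*B(i-j+m), instead of filling each row from its neighbours.
import Mathlib
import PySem

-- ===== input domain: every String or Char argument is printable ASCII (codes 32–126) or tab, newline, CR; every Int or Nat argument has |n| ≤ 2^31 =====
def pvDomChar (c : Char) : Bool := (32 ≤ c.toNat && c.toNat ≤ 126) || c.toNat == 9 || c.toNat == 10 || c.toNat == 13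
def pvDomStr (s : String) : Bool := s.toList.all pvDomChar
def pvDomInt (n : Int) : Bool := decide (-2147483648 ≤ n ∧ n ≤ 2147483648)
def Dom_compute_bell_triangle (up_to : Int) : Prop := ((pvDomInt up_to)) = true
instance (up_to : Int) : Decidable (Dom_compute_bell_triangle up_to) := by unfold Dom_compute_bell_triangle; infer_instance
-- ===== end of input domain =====

-- B replaces A's in-place neighbour recurrence by a different algorithm: Pascal's triangle,
-- then Bell numbers via Touchard's recurrence, then each entry by the binomial closed form
-- T(i,j) = sum_m C(j,m)*B(i-j+m) (objective: alternative; B is not faster).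

-- ===== PORT A =====
-- bell_triangle[r][c]; both indices are always in range here, so the total getD form is exact
def pvIdx2 (t : List (List Int)) (r c : Int) : Int :=
  PySem.List.pyGetD (PySem.List.pyGetD t r []) c 0

-- the body of A's inner 'for j in range(0, i+1)' loop
def pvInnerA (i : Int) (bt : List (List Int)) (j : Int) : List (List Int) :=
  let v := if j = 0 then pvIdx2 bt (i-1) (i-1)
           else pvIdx2 bt (i-1) (j-1) + pvIdx2 bt i (j-1)
  PySem.List.pySetD bt i (PySem.List.pySetD (PySem.List.pyGetD bt i []) j v)

-- the body of A's outer 'for i in range(1, up_to)' loop; the None placeholders of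
-- '[None for a in range(i+1)]' (always overwritten before being read) are represented by 0
def pvStepA (bt : List (List Int)) (i : Int) : List (List Int) :=
  let bt := bt ++ [(PySem.List.pyRange 0 (i+1) 1).map (fun _ => (0 : Int))]
  (PySem.List.pyRange 0 (i+1) 1).foldl (pvInnerA i) bt

def compute_bell_triangle (up_to : Int) : List (List Int) :=
  (PySem.List.pyRange 1 up_to 1).foldl pvStepA [[1]]

-- ===== PORT B =====
-- body of B's pascal loop: append the next Pascal row, zipped from the last one
def pvPascalStep (pascal : List (List Int)) (_i : Int) : List (List Int) :=
  let p := PySem.List.pyGetD pascal (-1) []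
  pascal ++ [List.zipWith (fun x y => x + y) (0 :: p) (p ++ [0])]

-- body of B's bell loop: append sum(pascal[m][k] * bell[k] for k in range(m+1))
def pvBellStep (pascal : List (List Int)) (bell : List Int) (m : Int) : List Int :=
  bell ++ [((PySem.List.pyRange 0 (m+1) 1).map (fun k =>
      PySem.List.pyGetD (PySem.List.pyGetD pascal m []) k 0 *
      PySem.List.pyGetD bell k 0)).sum]

def compute_bell_triangle_alt (up_to : Int) : List (List Int) :=
  let n := if up_to > 1 then up_to else 1
  let pascal := (PySem.List.pyRange 1 n 1).foldl pvPascalStep [[1]]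
  let bell := (PySem.List.pyRange 0 (n-1) 1).foldl (pvBellStep pascal) [1]
  (PySem.List.pyRange 0 n 1).map (fun i =>
    (PySem.List.pyRange 0 (i+1) 1).map (fun j =>
      ((PySem.List.pyRange 0 (j+1) 1).map (fun m =>
        PySem.List.pyGetD (PySem.List.pyGetD pascal j []) m 0 *
        PySem.List.pyGetD bell (i - j + m) 0)).sum))

-- ===== PRECONDITION & SPEC =====
def Spec_compute_bell_triangle (up_to : Int) (out : List (List Int)) : Prop := out = compute_bell_triangle_alt up_to
instance (up_to : Int) (out : List (List Int)) : Decidable (Spec_compute_bell_triangle up_to out) := by unfold Spec_compute_bell_triangle; infer_instance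

-- ===== CLAIM (what is proved, stated in full; the proofs are below) =====
def Claim_equal_compute_bell_triangle : Prop := ∀ (up_to : Int), Dom_compute_bell_triangle up_to → Spec_compute_bell_triangle up_to (compute_bell_triangle up_to)

-- ===== LEMMAS AND PROOFS =====

-- the Bell numbers, defined by Touchard's recurrence (the recurrence B's bell loop uses)
def Bel : Nat → Int
  | 0 => 1
  | n + 1 => ∑ k ∈ (Finset.range (n+1)).attach, ((n.choose k.1 : Nat) : Int) * Bel k.1
decreasing_by exact Finset.mem_range.mp k.2

theorem Bel_succ (n : Nat) : Bel (n+1) = ∑ k ∈ Finset.range (n+1), ((n.choose k : Nat):Int) * Bel k := by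
  conv_lhs => rw [Bel]
  exact Finset.sum_attach (Finset.range (n+1)) (fun k => ((n.choose k : Nat):Int) * Bel k)

theorem pv_sum_map_range (f : Nat → Int) (n : Nat) : ((List.range n).map f).sum = ∑ k ∈ Finset.range n, f k := by
  induction n with
  | zero => simp
  | succ n ih => simp [List.range_succ, Finset.sum_range_succ, ih]

-- the closed-form triangle entry: T(i,j) = sum_m C(j,m) * Bel(i-j+m)   (for j ≤ i)
def pvBT (i j : Nat) : Int :=
  ((List.range (j+1)).map (fun m => ((j.choose m : Nat) : Int) * Bel (i - j + m))).sum

def pvMathRow (i : Nat) : List Int := (List.range (i+1)).map (pvBT i)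

def pvChooseRow (m : Nat) : List Int := (List.range (m+1)).map (fun k => ((m.choose k : Nat) : Int))

-- the common value of entry k of the new row (prev = the previous row):
-- e 0 = prev's last entry, e (k+1) = e k + prev[k]
def pvSc (prev : List Int) : Nat → Int
  | 0 => prev.getD (prev.length - 1) 0
  | k+1 => pvSc prev k + prev.getD k 0

def pvRow (prev : List Int) : List Int := (List.range (prev.length + 1)).map (pvSc prev)

-- A's inner fill loop, step by step: after the first k indices the new row holds
-- [e 0, …, e (k-1)] followed by the remaining placeholders
theorem pv_innerA (base : List (List Int)) (i : Nat) (hi : 1 ≤ i) (hlen : base.length = i)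
    (hprev : (base.getLastD []).length = i) :
    ∀ k, k ≤ i+1 →
      (List.range k).foldl (fun bt (k' : Nat) => pvInnerA (i:Int) bt (k':Int))
        (base ++ [List.replicate (i+1) (0:Int)])
      = base ++ [(List.range k).map (pvSc (base.getLastD [])) ++ List.replicate (i+1-k) 0] := by
  intro k hk
  have hbne : base ≠ [] := by intro h; simp [h] at hlen; omega
  set prev := base.getLastD [] with hprevdef
  have hglast : base[i-1]'(by omega) = prev := by
    rw [hprevdef, List.getLastD_eq_getLast?, List.getLast?_eq_getElem?,
      List.getElem?_eq_getElem (by omega : base.length - 1 < base.length)]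
    simp [hlen]
  induction k with
  | zero => simp
  | succ k ih =>
    rw [List.range_succ, List.foldl_append, ih (by omega) hglast]
    simp only [List.foldl_cons, List.foldl_nil, pvInnerA]
    have hcast1 : (i:Int) - 1 = ((i-1 : Nat) : Int) := by omega
    have hgetbase : PySem.List.pyGetD (base ++ [(List.range k).map (pvSc prev) ++ List.replicate (i+1-k) 0]) ((i:Int)-1) [] = prev := by
      rw [hcast1, PySem.List.pyGetD_natCast, List.getD_eq_getElem?_getD,
        List.getElem?_append_left (by omega),
        List.getElem?_eq_getElem (by omega : i - 1 < base.length)]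
      simp [hglast]
    have hgetcur : PySem.List.pyGetD (base ++ [(List.range k).map (pvSc prev) ++ List.replicate (i+1-k) 0]) (i:Int) [] = (List.range k).map (pvSc prev) ++ List.replicate (i+1-k) 0 := by
      rw [PySem.List.pyGetD_natCast, List.getD_eq_getElem?_getD,
        List.getElem?_append_right (by omega), hlen]
      simp
    have hv : (if ((k:Int)) = 0 then pvIdx2 (base ++ [(List.range k).map (pvSc prev) ++ List.replicate (i+1-k) 0]) ((i:Int)-1) ((i:Int)-1)
              else pvIdx2 (base ++ [(List.range k).map (pvSc prev) ++ List.replicate (i+1-k) 0]) ((i:Int)-1) ((k:Int)-1)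
                 + pvIdx2 (base ++ [(List.range k).map (pvSc prev) ++ List.replicate (i+1-k) 0]) (i:Int) ((k:Int)-1))
              = pvSc prev k := by
      rcases Nat.eq_zero_or_pos k with hk0 | hkpos
      · subst hk0
        simp only [Nat.cast_zero, pvIdx2, hgetbase]
        rw [hcast1, PySem.List.pyGetD_natCast]
        simp [pvSc, hprev]
      · have hne0 : ((k:Int)) ≠ 0 := by omega
        rw [if_neg hne0]
        have hc2 : (k:Int) - 1 = ((k-1 : Nat) : Int) := by omega
        simp only [pvIdx2, hgetbase, hgetcur, hc2, PySem.List.pyGetD_natCast]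
        have h1 : ((List.range k).map (pvSc prev) ++ List.replicate (i+1-k) 0).getD (k-1) 0 = pvSc prev (k-1) := by
          rw [List.getD_eq_getElem?_getD, List.getElem?_append_left (by simp; omega),
            List.getElem?_eq_getElem (by simp; omega : k-1 < ((List.range k).map (pvSc prev)).length)]
          simp
        rw [h1]
        have hkk : k - 1 + 1 = k := by omega
        rw [← hkk, pvSc, add_comm, hkk]
    rw [hgetcur, hv]
    rw [PySem.List.pySetD_natCast, PySem.List.pySetD_natCast]
    rw [List.set_append, if_neg (by omega), hlen]
    simp only [Nat.sub_self]
    congr 1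
    rw [List.set_append, if_neg (by simp)]
    simp only [List.length_map, List.length_range, Nat.sub_self]
    have hrep : List.replicate (i+1-k) (0:Int) = 0 :: List.replicate (i-k) 0 := by
      have h2 : i+1-k = (i-k)+1 := by omega
      rw [h2, List.replicate_succ]
    rw [hrep]
    simp

-- one outer step of A appends exactly the prefix-sum row
theorem pv_stepA_eq (bt : List (List Int)) (i : Nat) (hi : 1 ≤ i) (hlen : bt.length = i)
    (hprev : (bt.getLastD []).length = i) :
    pvStepA bt (i:Int) = bt ++ [pvRow (bt.getLastD [])] := by
  unfold pvStepA
  have hc : (i:Int) + 1 = ((i+1 : Nat) : Int) := by push_cast; ring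
  rw [hc, PySem.List.pyRange_zero_natCast, List.foldl_map]
  have hz : (List.map (fun (k : Nat) => (k:Int)) (List.range (i+1))).map (fun _ => (0:Int))
      = List.replicate (i+1) (0:Int) := by
    rw [List.map_map]
    show List.map (fun _ => (0:Int)) (List.range (i+1)) = _
    rw [List.map_const', List.length_range]
  rw [hz, pv_innerA bt i hi hlen hprev (i+1) le_rfl, pvRow, hprev]
  simp

-- T(i,0) = Bel i
theorem pvBT_zero (i : Nat) : pvBT i 0 = Bel i := by
  simp [pvBT]

-- T(i,i) = Bel (i+1): Touchard's recurrence
theorem pvBT_diag (i : Nat) : pvBT i i = Bel (i+1) := by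
  rw [pvBT, Bel_succ, pv_sum_map_range]
  simp

-- Pascal-rule sum identity underlying the Bell-triangle recurrence
theorem pv_pascal_sum (j t : Nat) :
    ∑ m ∈ Finset.range (j+2), (((j+1).choose m : Nat):Int) * Bel (t+m)
    = ∑ m ∈ Finset.range (j+1), ((j.choose m : Nat):Int) * Bel (t+m+1)
    + ∑ m ∈ Finset.range (j+1), ((j.choose m : Nat):Int) * Bel (t+m) := by
  rw [Finset.sum_range_succ' (fun m => (((j+1).choose m : Nat):Int) * Bel (t+m))]
  have hs : ∀ m ∈ Finset.range (j+1), (((j+1).choose (m+1) : Nat):Int) * Bel (t+(m+1))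
      = ((j.choose m : Nat):Int) * Bel (t+m+1) + ((j.choose (m+1) : Nat):Int) * Bel (t+(m+1)) := by
    intro m _
    rw [Nat.choose_succ_succ]
    push_cast
    rw [add_mul]
    congr 3
  rw [Finset.sum_congr rfl hs, Finset.sum_add_distrib]
  rw [Finset.sum_range_succ' (fun m => ((j.choose m : Nat):Int) * Bel (t+m))]
  have hB : ∑ m ∈ Finset.range (j+1), ((j.choose (m+1) : Nat):Int) * Bel (t+(m+1))
      = ∑ m ∈ Finset.range j, ((j.choose (m+1) : Nat):Int) * Bel (t+(m+1)) := by
    rw [Finset.sum_range_succ]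
    simp [Nat.choose_succ_self]
  rw [hB]
  simp only [Nat.choose_zero_right, Nat.cast_one, one_mul, Nat.add_zero]
  ring

-- the Bell-triangle recurrence for the closed form
theorem pvBT_succ (i j : Nat) (hj : j ≤ i) : pvBT (i+1) (j+1) = pvBT (i+1) j + pvBT i j := by
  rw [pvBT, pvBT, pvBT, pv_sum_map_range, pv_sum_map_range, pv_sum_map_range]
  have e1 : ∀ m ∈ Finset.range (j+2), (((j+1).choose m : Nat):Int) * Bel (i+1-(j+1)+m)
      = (((j+1).choose m : Nat):Int) * Bel (i-j+m) := by
    intro m _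
    congr 2
    omega
  have e2 : ∀ m ∈ Finset.range (j+1), ((j.choose m : Nat):Int) * Bel (i+1-j+m)
      = ((j.choose m : Nat):Int) * Bel (i-j+m+1) := by
    intro m _
    congr 2
    omega
  rw [Finset.sum_congr rfl e1, Finset.sum_congr rfl e2]
  exact pv_pascal_sum j (i-j)

-- the prefix-sum row of math row i is math row (i+1)
theorem pv_row_math (i : Nat) : pvRow (pvMathRow i) = pvMathRow (i+1) := by
  have hlen : (pvMathRow i).length = i+1 := by simp [pvMathRow]
  have hgetD : ∀ k, k ≤ i → (pvMathRow i).getD k 0 = pvBT i k := by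
    intro k hk
    rw [pvMathRow, List.getD_eq_getElem?_getD,
      List.getElem?_eq_getElem (by simp; omega : k < ((List.range (i+1)).map (pvBT i)).length)]
    simp
  have hsc : ∀ k, k ≤ i+1 → pvSc (pvMathRow i) k = pvBT (i+1) k := by
    intro k hk
    induction k with
    | zero =>
      rw [pvSc, hlen]
      simp only [Nat.add_sub_cancel]
      rw [hgetD i le_rfl, pvBT_diag, pvBT_zero]
    | succ k ih =>
      rw [pvSc, ih (by omega), hgetD k (by omega), pvBT_succ i k (by omega)]
  rw [pvRow, hlen, pvMathRow]
  exact List.map_congr_left (fun k hk => hsc k (by simpa using Nat.lt_succ_iff.mp (List.mem_range.mp hk)))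

-- last element of a mapped range
theorem pv_getLastD_map_range (f : Nat → List Int) (n : Nat) (hn : 1 ≤ n) :
    ((List.range n).map f).getLastD [] = f (n-1) := by
  have h : n = (n-1)+1 := by omega
  rw [h, List.range_succ, List.map_append]
  simp

-- A's triangle is the closed-form triangle
theorem pv_outerA (n : Nat) (hn : 1 ≤ n) :
    compute_bell_triangle (n:Int) = (List.range n).map pvMathRow := by
  induction n, hn using Nat.le_induction with
  | base =>
    unfold compute_bell_triangle
    rw [Nat.cast_one, PySem.List.pyRange_one_eq_nil le_rfl]
    simp [pvMathRow, pvBT, Bel]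
  | succ n hn ih =>
    have hc : ((n+1 : Nat) : Int) = (n:Int) + 1 := by push_cast; ring
    have hr : PySem.List.pyRange 1 ((n:Int)+1) 1 = PySem.List.pyRange 1 (n:Int) 1 ++ [(n:Int)] :=
      PySem.List.pyRange_one_succ_right (by exact_mod_cast hn)
    have hA : compute_bell_triangle ((n+1 : Nat) : Int)
        = pvStepA (compute_bell_triangle (n:Int)) (n:Int) := by
      unfold compute_bell_triangle
      rw [hc, hr, List.foldl_append]
      simp
    rw [hA, ih, pv_stepA_eq _ n hn (by simp) (by rw [pv_getLastD_map_range _ n hn]; simp [pvMathRow]; omega)]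
    rw [pv_getLastD_map_range _ n hn]
    have : pvMathRow (n-1+1) = pvMathRow n := by rw [Nat.sub_add_cancel hn]
    rw [pv_row_math (n-1), this, List.range_succ, List.map_append]
    simp

-- B's pascal rows are the binomial rows
theorem pv_zip_choose (m : Nat) :
    List.zipWith (fun x y => x + y) (0 :: pvChooseRow m) (pvChooseRow m ++ [0]) = pvChooseRow (m+1) := by
  apply List.ext_getElem
  · simp [pvChooseRow]
  · intro k h1 h2
    have hk : k < m+2 := by simp [pvChooseRow] at h2; omega
    rw [List.getElem_zipWith]
    rcases Nat.eq_zero_or_pos k with hk0 | hkpos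
    · subst hk0
      simp [pvChooseRow]
    · obtain ⟨j, rfl⟩ : ∃ j, k = j+1 := ⟨k-1, by omega⟩
      have hgl : (0 :: pvChooseRow m)[j+1]'(by simp [pvChooseRow]; omega) = ((m.choose j : Nat) : Int) := by
        simp only [List.getElem_cons_succ]
        simp [pvChooseRow]
      have hgr : (pvChooseRow m ++ [0])[j+1]'(by simp [pvChooseRow]; omega) = ((m.choose (j+1) : Nat) : Int) := by
        rcases Nat.lt_or_ge (j+1) (m+1) with hlt | hge
        · rw [List.getElem_append_left (by simp [pvChooseRow]; omega)]
          simp [pvChooseRow]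
        · have hj : j = m := by omega
          subst hj
          rw [List.getElem_append_right (by simp [pvChooseRow])]
          simp [pvChooseRow, Nat.choose_succ_self]
    
      rw [hgl, hgr]
      have hrhs : (pvChooseRow (m+1))[j+1]'h2 = (((m+1).choose (j+1) : Nat) : Int) := by
        simp [pvChooseRow]
      rw [hrhs, Nat.choose_succ_succ]
      push_cast
      ring
theorem pv_pascal_eq (n : Nat) (hn : 1 ≤ n) :
    (PySem.List.pyRange 1 (n:Int) 1).foldl pvPascalStep [[1]] = (List.range n).map pvChooseRow := by
  induction n, hn using Nat.le_induction with
  | base =>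
    rw [Nat.cast_one, PySem.List.pyRange_one_eq_nil le_rfl]
    simp [pvChooseRow]
  | succ n hn ih =>
    have hc : ((n+1 : Nat) : Int) = (n:Int) + 1 := by push_cast; ring
    rw [hc, PySem.List.pyRange_one_succ_right (by exact_mod_cast hn), List.foldl_append]
    rw [ih]
    simp only [List.foldl_cons, List.foldl_nil, pvPascalStep]
    have hne : (List.range n).map pvChooseRow ≠ [] := by simp; omega
    rw [PySem.List.pyGetD_neg_one _ _ hne]
    have hlast : ((List.range n).map pvChooseRow).getLast hne = pvChooseRow (n-1) := by
      have h1 := pv_getLastD_map_range pvChooseRow n hn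
      rw [List.getLastD_eq_getLast?, List.getLast?_eq_some_getLast hne, Option.getD_some] at h1
      exact h1
    rw [hlast, pv_zip_choose (n-1), Nat.sub_add_cancel hn, List.range_succ, List.map_append]
    simp

-- getD of a mapped range below the bound
theorem pv_getD_map_range {α : Type} [Inhabited α] (f : Nat → α) (n k : Nat) (d : α) (hk : k < n) :
    ((List.range n).map f).getD k d = f k := by
  rw [List.getD_eq_getElem?_getD,
    List.getElem?_eq_getElem (by simp; omega : k < ((List.range n).map f).length)]
  simp

-- B's bell list is the Bell numbers
theorem pv_bell_eq (N : Nat) (hN : 1 ≤ N) :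
    ∀ k, k ≤ N-1 →
      (PySem.List.pyRange 0 (k:Int) 1).foldl (pvBellStep ((List.range N).map pvChooseRow)) [1]
      = (List.range (k+1)).map Bel := by
  intro k hk
  induction k with
  | zero =>
    rw [Nat.cast_zero, PySem.List.pyRange_one_eq_nil le_rfl]
    have : Bel 0 = 1 := by rw [Bel]
    simp [this]
  | succ k ih =>
    have hc : ((k+1 : Nat) : Int) = (k:Int) + 1 := by push_cast; ring
    rw [hc, PySem.List.pyRange_one_succ_right (by exact_mod_cast Nat.zero_le k), List.foldl_append]
    rw [ih (by omega)]
    simp only [List.foldl_cons, List.foldl_nil, pvBellStep]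
    have hpas : PySem.List.pyGetD ((List.range N).map pvChooseRow) (k:Int) [] = pvChooseRow k := by
      rw [PySem.List.pyGetD_natCast]
      exact pv_getD_map_range _ N k [] (by omega)
    have hsum : ((PySem.List.pyRange 0 ((k:Int)+1) 1).map (fun m =>
        PySem.List.pyGetD (PySem.List.pyGetD ((List.range N).map pvChooseRow) (k:Int) []) m 0 *
        PySem.List.pyGetD ((List.range (k+1)).map Bel) m 0)).sum = Bel (k+1) := by
      rw [hpas]
      have hc2 : (k:Int)+1 = ((k+1 : Nat) : Int) := by push_cast; ring
      rw [hc2, PySem.List.pyRange_zero_natCast, List.map_map]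
      rw [List.map_congr_left (fun m hm => by
        have hmk : m < k+1 := List.mem_range.mp hm
        show PySem.List.pyGetD (pvChooseRow k) ((m:Nat):Int) 0 *
              PySem.List.pyGetD ((List.range (k+1)).map Bel) ((m:Nat):Int) 0
            = ((k.choose m : Nat) : Int) * Bel m
        rw [PySem.List.pyGetD_natCast, PySem.List.pyGetD_natCast,
          pv_getD_map_range _ (k+1) m 0 hmk, pvChooseRow, pv_getD_map_range _ (k+1) m 0 hmk])]
      rw [pv_sum_map_range, Bel_succ]
    rw [hsum, List.range_succ (n := k+1), List.map_append]
    simp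

-- B's triangle is the closed-form triangle
theorem pv_altB (N : Nat) (h2 : 2 ≤ N) :
    compute_bell_triangle_alt (N:Int) = (List.range N).map pvMathRow := by
  simp only [compute_bell_triangle_alt]
  rw [if_pos (by exact_mod_cast (by omega : (1:Int) < (N:Int)))]
  rw [pv_pascal_eq N (by omega)]
  have hc : (N:Int) - 1 = ((N-1 : Nat) : Int) := by omega
  rw [hc, pv_bell_eq N (by omega) (N-1) le_rfl, Nat.sub_add_cancel (by omega)]
  rw [PySem.List.pyRange_zero_natCast, List.map_map]
  apply List.map_congr_left
  intro i hi
  have hiN : i < N := List.mem_range.mp hi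
  show (PySem.List.pyRange 0 ((i:Int)+1) 1).map _ = pvMathRow i
  have hc1 : (i:Int)+1 = ((i+1 : Nat) : Int) := by push_cast; ring
  rw [hc1, PySem.List.pyRange_zero_natCast, List.map_map, pvMathRow]
  apply List.map_congr_left
  intro j hj
  have hji : j < i+1 := List.mem_range.mp hj
  show ((PySem.List.pyRange 0 (((j:Nat):Int)+1) 1).map (fun m =>
        PySem.List.pyGetD (PySem.List.pyGetD ((List.range N).map pvChooseRow) ((j:Nat):Int) []) m 0 *
        PySem.List.pyGetD ((List.range N).map Bel) (((i:Nat):Int) - ((j:Nat):Int) + m) 0)).sum = pvBT i j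
  have hc2 : ((j:Nat):Int)+1 = ((j+1 : Nat) : Int) := by push_cast; ring
  rw [hc2, PySem.List.pyRange_zero_natCast, List.map_map]
  have hpas : PySem.List.pyGetD ((List.range N).map pvChooseRow) ((j:Nat):Int) [] = pvChooseRow j := by
    rw [PySem.List.pyGetD_natCast]
    exact pv_getD_map_range _ N j [] (by omega)
  rw [hpas, pvBT]
  apply congrArg
  apply List.map_congr_left
  intro m hm
  have hmj : m < j+1 := List.mem_range.mp hm
  show PySem.List.pyGetD (pvChooseRow j) ((m:Nat):Int) 0 *
        PySem.List.pyGetD ((List.range N).map Bel) (((i:Nat):Int) - ((j:Nat):Int) + ((m:Nat):Int)) 0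
      = ((j.choose m : Nat) : Int) * Bel (i - j + m)
  have hidx : ((i:Nat):Int) - ((j:Nat):Int) + ((m:Nat):Int) = ((i - j + m : Nat) : Int) := by omega
  rw [hidx, PySem.List.pyGetD_natCast, PySem.List.pyGetD_natCast,
    pvChooseRow, pv_getD_map_range _ (j+1) m 0 hmj,
    pv_getD_map_range _ N (i-j+m) 0 (by omega)]

-- ===== VERDICT (by name: the statement is the Claim_ definition above) =====
theorem compute_bell_triangle_spec : Claim_equal_compute_bell_triangle := by
  intro up_to _
  unfold Spec_compute_bell_triangle
  by_cases h : up_to ≤ 1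
  · unfold compute_bell_triangle
    rw [PySem.List.pyRange_one_eq_nil h]
    unfold compute_bell_triangle_alt
    rw [if_neg (by omega)]
    decide
  · have hn : up_to = ((up_to.toNat : Nat) : Int) := by omega
    rw [hn, pv_outerA up_to.toNat (by omega), pv_altB up_to.toNat (by omega)]
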